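-- pv_equiv track=rewrite | github.com/Moataz-E/coding_problems | hackerrank/python/algorithms/implementation/cut_the_sticks.py | perform_cut
-- ===== SOURCE A (Python) =====
-- def perform_cut(sticks):
--     """Perform cut operation on sticks until no sticks remain.
--
--     Args:
--         sticks: list containing initial lengths of each stick.
--
--     Returns:
--         List of remaining sticks after every cut operation.
--     """
--     new_sticks = sticks
--     smallest_stick = min(sticks)
--     remaining_sticks = [len(sticks)]
--     while len(new_sticks) > 0:
--         new_sticks = [x - smallest_stick for x in new_sticks if
--                       x - smallest_stick > 0]
--         remaining_sticks.append(len(new_sticks))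
--         smallest_stick = min(new_sticks or [0])
--
--     return remaining_sticks[:-1]
-- ===== SOURCE B (Python) =====
-- def perform_cut(sticks):
--     """Sort once, then sweep the sorted list with an index pointer:
--     each distinct value starts a group at index i, and n - i sticks remain
--     before that cut.  O(n log n) instead of A's repeated scan per cut."""
--     s = sorted(sticks)
--     n = len(s)
--     out = []
--     i = 0
--     while i < n:
--         out.append(n - i)
--         v = s[i]
--         while i < n and s[i] == v:
--             i += 1
--     return out
-- ===== Notes on version B (the rewrite author's own statement) =====
-- stated objective: faster
-- what changed: B sorts the sticks once and sweeps the sorted list with an index pointer, emitting n - i at the start index i of each distinct-value group, instead of A's repeated rebuild-and-rescan (subtract the minimum, filter, take min again) per cut operation.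
-- crash fix: On the empty list A raises ValueError (min of empty sequence) while B returns []. — e.g. on perform_cut([]): A raises ValueError, B returns []
import Mathlib
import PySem

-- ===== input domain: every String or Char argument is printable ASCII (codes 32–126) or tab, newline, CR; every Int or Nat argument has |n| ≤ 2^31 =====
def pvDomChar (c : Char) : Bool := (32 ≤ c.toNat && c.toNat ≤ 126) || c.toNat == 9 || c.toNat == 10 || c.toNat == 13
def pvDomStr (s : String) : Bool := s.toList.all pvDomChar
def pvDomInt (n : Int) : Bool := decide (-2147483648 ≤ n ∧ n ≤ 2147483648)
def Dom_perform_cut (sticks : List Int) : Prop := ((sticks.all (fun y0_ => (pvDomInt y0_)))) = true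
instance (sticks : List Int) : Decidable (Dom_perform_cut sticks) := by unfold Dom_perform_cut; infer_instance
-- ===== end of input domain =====

-- B sorts once and sweeps the sorted list by group-start indices instead of A's
-- rebuild-and-rescan per cut operation; equivalence proved on nonempty lists
-- (A raises ValueError on []).


-- ===== PORT A =====
-- the while loop; `smallest_stick` at loop entry is always min(new_sticks or [0])
-- (set before the loop / at the end of the previous iteration), so the port
-- recomputes that value here instead of threading it through the recursion.
def pcLoop (ns : List Int) (remaining : List Int) : List Int :=
  if h : 0 < ns.length then
    let smallest := (PySem.List.min? (if ns.isEmpty then [0] else ns) (fun x => x)).getD 0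
    let ns' := (ns.filter (fun x => decide (0 < x - smallest))).map (fun x => x - smallest)
    pcLoop ns' (remaining ++ [(ns'.length : Int)])
  else remaining
termination_by ns.length
decreasing_by
  have hne : ns ≠ [] := by intro hc; rw [hc] at h; simp at h
  have hemp : ns.isEmpty = false := by simp [hne]
  rcases hmo : PySem.List.min? ns (fun x => x) with _ | m
  · exact absurd ((PySem.List.min?_eq_none_iff _ _).mp hmo) hne
  · rw [List.length_map]
    have hm : m ∈ ns := PySem.List.min?_mem hmo
    rw [← List.length_attach (l := ns)]
    apply List.length_filter_lt_length_iff_exists.mpr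
    refine ⟨⟨m, hm⟩, List.mem_attach _ _, ?_⟩
    simp [hemp, hmo]

def perform_cut (sticks : List Int) : List Int :=
  match PySem.List.min? sticks (fun x => x) with
  | none => []    -- min([]) raises ValueError; excluded by Pre_perform_cut
  | some _ =>
      PySem.List.slice (pcLoop sticks [(sticks.length : Int)]) none (some (-1))

-- ===== PORT B =====
-- inner loop: `while i < len(s) and s[i] == v: i += 1`
def skipGroup (s : List Int) (v : Int) (i : Nat) : Nat :=
  if h : i < s.length then
    if s[i] == v then skipGroup s v (i + 1) else i
  else i
termination_by s.length - i

theorem le_skipGroup (s : List Int) (v : Int) (i : Nat) : i ≤ skipGroup s v i := by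
  unfold skipGroup
  split
  · split
    · have := le_skipGroup s v (i + 1); omega
    · exact Nat.le_refl i
  · exact Nat.le_refl i
termination_by s.length - i

-- outer loop: one output entry per distinct-value group start
def bLoop (s : List Int) (i : Nat) (out : List Int) : List Int :=
  if h : i < s.length then
    bLoop s (skipGroup s s[i] i) (out ++ [(s.length : Int) - (i : Int)])
  else out
termination_by s.length - i
decreasing_by
  have h1 : i + 1 ≤ skipGroup s s[i] i := by
    unfold skipGroup; simp [h]; exact le_skipGroup s s[i] (i + 1)
  omega

def perform_cut_alt (sticks : List Int) : List Int :=
  bLoop (PySem.List.sorted sticks (fun x => x) false) 0 []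

-- ===== PRECONDITION & SPEC =====
-- Pre_ excludes only the empty list, on which A's min(sticks) raises ValueError.
def Pre_perform_cut (sticks : List Int) : Prop := sticks ≠ []
instance (sticks : List Int) : Decidable (Pre_perform_cut sticks) := by unfold Pre_perform_cut; infer_instance
def pvWitness_perform_cut : List Int := [5, 4, 4, 2, 2, 8]

-- On the empty list A raises ValueError (min of empty sequence); B returns [].
def Raises_perform_cut (sticks : List Int) : Prop := sticks = []
instance (sticks : List Int) : Decidable (Raises_perform_cut sticks) := by unfold Raises_perform_cut; infer_instance
def pvRaiseWitness_perform_cut : List Int := []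
def pvRaiseWitnessOut_perform_cut : List Int := []

def Spec_perform_cut (sticks : List Int) (out : List Int) : Prop := out = perform_cut_alt sticks
instance (sticks : List Int) (out : List Int) : Decidable (Spec_perform_cut sticks out) := by unfold Spec_perform_cut; infer_instance

-- ===== CLAIM (what is proved, stated in full; the proofs are below) =====
def Claim_equal_perform_cut : Prop := ∀ (sticks : List Int), Dom_perform_cut sticks → Pre_perform_cut sticks → Spec_perform_cut sticks (perform_cut sticks)
def Claim_raises_perform_cut : Prop := (∀ (sticks : List Int), Dom_perform_cut sticks → Raises_perform_cut sticks → ¬ Pre_perform_cut sticks) ∧ (Dom_perform_cut (pvRaiseWitness_perform_cut) ∧ Raises_perform_cut (pvRaiseWitness_perform_cut) ∧ perform_cut_alt (pvRaiseWitness_perform_cut) = pvRaiseWitnessOut_perform_cut)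

-- ===== LEMMAS AND PROOFS =====

-- the minimum value of a nonempty list, as an Int
def minV (l : List Int) : Int := (PySem.List.min? l (fun x => x)).getD 0

-- one cut, without A's shift by the minimum: the sticks strictly above the minimum
def stepG (l : List Int) : List Int := l.filter (fun x => decide (minV l < x))

theorem stepG_shrink (l : List Int) (h : l ≠ []) : (stepG l).length < l.length := by
  rcases hmo : PySem.List.min? l (fun x => x) with _ | m
  · exact absurd ((PySem.List.min?_eq_none_iff _ _).mp hmo) h
  · exact List.length_filter_lt_length_iff_exists.mpr
      ⟨m, PySem.List.min?_mem hmo, by simp [minV, hmo]⟩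

-- A's output on a nonempty list: the remaining count before each cut
def gRes (l : List Int) : List Int :=
  if _ : l = [] then [] else (l.length : Int) :: gRes (stepG l)
termination_by l.length
decreasing_by exact stepG_shrink l (by assumption)

theorem gRes_ne (l : List Int) (h : l ≠ []) :
    gRes l = (l.length : Int) :: gRes (stepG l) := by
  rw [gRes, dif_neg h]

-- A's appended counts: the remaining count after each cut (ends with the final 0)
def gLoop (l : List Int) : List Int :=
  if _ : l = [] then [] else ((stepG l).length : Int) :: gLoop (stepG l)
termination_by l.length
decreasing_by exact stepG_shrink l (by assumption)

theorem gLoop_ne (l : List Int) (h : l ≠ []) :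
    gLoop l = ((stepG l).length : Int) :: gLoop (stepG l) := by
  rw [gLoop, dif_neg h]

-- one unfolding of A's loop on a nonempty list, in clean form
theorem pcLoop_step (l : List Int) (remaining : List Int) (hne : l ≠ []) (mv : Int)
    (hmo : PySem.List.min? l (fun x => x) = some mv) :
    pcLoop l remaining =
      pcLoop ((l.filter (fun x => decide (0 < x - mv))).map (fun x => x - mv))
        (remaining ++ [(((l.filter (fun x => decide (0 < x - mv))).map (fun x => x - mv)).length : Int)]) := by
  have hpos : 0 < l.length := List.length_pos_iff.mpr hne
  have hemp : l.isEmpty = false := by simp [hne]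
  rw [pcLoop, dif_pos hpos]
  simp only [hemp, Bool.false_eq_true, if_false, hmo, Option.getD_some]

-- shifting every stick by the minimum is what Python's subtraction does
theorem sub_shift (l : List Int) (m : Int) :
    PySem.List.min? (l.map (fun x => x - m)) (fun x => x) =
      (PySem.List.min? l (fun x => x)).map (fun x => x - m) := by
  cases l with
  | nil => simp [PySem.List.min?]
  | cons x t =>
      simp only [List.map_cons, PySem.List.min?_id_cons, Option.map_some]
      congr 1
      induction t generalizing x with
      | nil => simp
      | cons y t ih => simpa [Int.sub_eq_add_neg, Int.min_add_right] using ih (min x y)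

-- pcLoop is invariant under shifting every stick by the same amount
theorem pcLoop_shift (l : List Int) (m : Int) (remaining : List Int) :
    pcLoop (l.map (fun x => x - m)) remaining = pcLoop l remaining := by
  by_cases hl : l = []
  · simp [hl, pcLoop]
  · rcases hmo : PySem.List.min? l (fun x => x) with _ | mv
    · exact absurd ((PySem.List.min?_eq_none_iff _ _).mp hmo) hl
    · have hmo' : PySem.List.min? (l.map (fun x => x - m)) (fun x => x) = some (mv - m) := by
        rw [sub_shift, hmo]; rfl
      have harg : ((l.map (fun x => x - m)).filter (fun x => decide (0 < x - (mv - m)))).map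
          (fun x => x - (mv - m)) =
          (l.filter (fun x => decide (0 < x - mv))).map (fun x => x - mv) := by
        rw [List.filter_map, List.map_map]
        have h1 : l.filter ((fun x => decide (0 < x - (mv - m))) ∘ (fun x => x - m)) =
            l.filter (fun x => decide (0 < x - mv)) :=
          List.filter_congr (fun x _ => by simp [Function.comp])
        rw [h1]
        congr 1
        funext x
        simp [Function.comp]
      rw [pcLoop_step (l.map (fun x => x - m)) remaining (by simp [hl]) (mv - m) hmo',
        pcLoop_step l remaining hl mv hmo, harg]

-- pcLoop appends the after-cut counts to the accumulator
theorem pcLoop_eq_gLoop (l : List Int) (remaining : List Int) :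
    pcLoop l remaining = remaining ++ gLoop l := by
  by_cases hl : l = []
  · simp [hl, pcLoop, gLoop]
  · rcases hmo : PySem.List.min? l (fun x => x) with _ | mv
    · exact absurd ((PySem.List.min?_eq_none_iff _ _).mp hmo) hl
    · have hmv : minV l = mv := by simp [minV, hmo]
      have h1 : l.filter (fun x => decide (0 < x - mv)) = stepG l := by
        unfold stepG
        rw [hmv]
        exact List.filter_congr (fun x _ => by simp [Int.sub_pos])
      rw [pcLoop_step l remaining hl mv hmo, h1, pcLoop_shift (stepG l) mv,
        pcLoop_eq_gLoop (stepG l), gLoop_ne l hl]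
      simp
termination_by l.length
decreasing_by exact stepG_shrink l hl

-- dropping the final 0 from [n] ++ gLoop turns the after-counts into gRes
theorem cons_dropLast_gLoop (l : List Int) (h : l ≠ []) :
    (l.length : Int) :: (gLoop l).dropLast = gRes l := by
  rw [gRes_ne l h, gLoop_ne l h]
  by_cases ht : stepG l = []
  · simp [ht, gLoop, gRes]
  · have : gLoop (stepG l) ≠ [] := by rw [gLoop_ne _ ht]; simp
    rw [List.dropLast_cons_of_ne_nil this]
    rw [cons_dropLast_gLoop (stepG l) ht]
termination_by l.length
decreasing_by exact stepG_shrink l h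

-- the minimum VALUE only depends on the multiset of sticks
theorem minV_perm (l l' : List Int) (hp : l.Perm l') (h : l ≠ []) : minV l = minV l' := by
  have h' : l' ≠ [] := by intro hc; exact h (List.Perm.eq_nil (hc ▸ hp))
  rcases hmo : PySem.List.min? l (fun x => x) with _ | m
  · exact absurd ((PySem.List.min?_eq_none_iff _ _).mp hmo) h
  rcases hmo' : PySem.List.min? l' (fun x => x) with _ | m'
  · exact absurd ((PySem.List.min?_eq_none_iff _ _).mp hmo') h'
  have hm : m ∈ l := PySem.List.min?_mem hmo
  have hm' : m' ∈ l' := PySem.List.min?_mem hmo'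
  have h1 : m ≤ m' := PySem.List.min?_isMin hmo m' (hp.symm.subset hm')
  have h2 : m' ≤ m := PySem.List.min?_isMin hmo' m (hp.subset hm)
  simp [minV, hmo, hmo', le_antisymm h1 h2]

-- A's result only depends on the multiset of sticks
theorem gRes_perm (l l' : List Int) (hp : l.Perm l') : gRes l = gRes l' := by
  by_cases h : l = []
  · subst h; rw [hp.symm.eq_nil]
  · have h' : l' ≠ [] := by intro hc; exact h (List.Perm.eq_nil (hc ▸ hp))
    rw [gRes_ne l h, gRes_ne l' h']
    have hmv : minV l = minV l' := minV_perm l l' hp h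
    have hps : (stepG l).Perm (stepG l') := by
      unfold stepG; rw [hmv]; exact hp.filter _
    rw [hp.length_eq, gRes_perm (stepG l) (stepG l') hps]
termination_by l.length
decreasing_by exact stepG_shrink l h

-- on a sorted list bounded below by m, the sticks above m are the tail after the m-group
theorem filter_gt_eq_dropWhile (m : Int) (l : List Int) (hs : l.Pairwise (· ≤ ·))
    (hall : ∀ x ∈ l, m ≤ x) :
    l.filter (fun x => decide (m < x)) = l.dropWhile (fun x => x == m) := by
  induction l with
  | nil => simp
  | cons x t ih =>
      rcases eq_or_lt_of_le (hall x List.mem_cons_self) with hxm | hxm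
      · rw [List.filter_cons, List.dropWhile_cons]
        simp only [← hxm, beq_self_eq_true, if_true, lt_irrefl, decide_false, Bool.false_eq_true,
          if_false]
        exact ih hs.of_cons (fun y hy => hall y (List.mem_cons_of_mem x hy))
      · rw [List.filter_cons, List.dropWhile_cons]
        have hne : (x == m) = false := by simp; omega
        simp only [hne, hxm, decide_true, if_true, Bool.false_eq_true, if_false]
        congr 1
        apply List.filter_eq_self.mpr
        intro y hy
        have : x ≤ y := (List.pairwise_cons.mp hs).1 y hy
        simp; omega

theorem minV_sorted (x : Int) (t : List Int) (hs : (x :: t).Pairwise (· ≤ ·)) :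
    minV (x :: t) = x := by
  rcases hmo : PySem.List.min? (x :: t) (fun x => x) with _ | m
  · exact absurd ((PySem.List.min?_eq_none_iff _ _).mp hmo) (List.cons_ne_nil x t)
  have hm : m ∈ x :: t := PySem.List.min?_mem hmo
  have h1 : m ≤ x := PySem.List.min?_isMin hmo x List.mem_cons_self
  have h2 : x ≤ m := by
    rcases List.mem_cons.mp hm with h | h
    · omega
    · exact (List.pairwise_cons.mp hs).1 m h
  simp [minV, hmo]; omega

theorem stepG_sorted (l : List Int) (hs : l.Pairwise (· ≤ ·)) (h : l ≠ []) :
    stepG l = l.dropWhile (fun x => x == l.headI) := by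
  cases l with
  | nil => exact absurd rfl h
  | cons x t =>
      unfold stepG
      rw [minV_sorted x t hs]
      apply filter_gt_eq_dropWhile x _ hs
      intro y hy
      rcases List.mem_cons.mp hy with h | h
      · omega
      · exact (List.pairwise_cons.mp hs).1 y h

-- skipGroup lands exactly past the group of sticks equal to v
theorem drop_skipGroup (s : List Int) (v : Int) (i : Nat) (h : i ≤ s.length) :
    s.drop (skipGroup s v i) = (s.drop i).dropWhile (fun x => x == v) := by
  rw [skipGroup]
  by_cases hi : i < s.length
  · rw [List.drop_eq_getElem_cons hi, List.dropWhile_cons]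
    by_cases hv : s[i] == v
    · simp only [hi, dif_pos, hv, if_true]
      exact drop_skipGroup s v (i + 1) hi
    · simp only [hi, dif_pos, hv, Bool.false_eq_true, if_false]
      rw [List.drop_eq_getElem_cons hi]
  · have hieq : i = s.length := by omega
    simp [hieq]
termination_by s.length - i

theorem skipGroup_le (s : List Int) (v : Int) (i : Nat) (h : i ≤ s.length) :
    skipGroup s v i ≤ s.length := by
  rw [skipGroup]
  by_cases hi : i < s.length
  · by_cases hv : s[i] == v
    · simp only [hi, dif_pos, hv, if_true]
      exact skipGroup_le s v (i + 1) hi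
    · simp [hi, hv]; omega
  · simp [hi]; omega
termination_by s.length - i

-- bLoop appends its output to the accumulator
theorem bLoop_append (s : List Int) (i : Nat) (out : List Int) :
    bLoop s i out = out ++ bLoop s i [] := by
  rw [bLoop, bLoop]
  by_cases hi : i < s.length
  · simp only [hi, dif_pos]
    rw [bLoop_append s _ (out ++ _), bLoop_append s _ ([] ++ _)]
    simp
  · simp [hi]
termination_by s.length - i
decreasing_by
  all_goals
    have h1 : i + 1 ≤ skipGroup s s[i] i := by
      unfold skipGroup; simp [hi]; exact le_skipGroup s s[i] (i + 1)
    omega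

-- B's sweep from index i computes A's result on the remaining sorted suffix
theorem bLoop_eq_gRes (s : List Int) (hs : s.Pairwise (· ≤ ·)) (i : Nat) (h : i ≤ s.length) :
    bLoop s i [] = gRes (s.drop i) := by
  rw [bLoop]
  by_cases hi : i < s.length
  · simp only [hi, dif_pos, List.nil_append]
    have hd : s.drop i ≠ [] := by
      intro hc
      have := List.length_drop (l := s) (i := i)
      rw [hc] at this
      simp at this; omega
    rw [gRes_ne _ hd]
    have hd1 : s.drop i = s[i] :: s.drop (i + 1) := List.drop_eq_getElem_cons hi
    have hsd : (s.drop i).Pairwise (· ≤ ·) := hs.drop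
    have hh : (s.drop i).headI = s[i] := by rw [hd1]; rfl
    have hstep : stepG (s.drop i) = s.drop (skipGroup s s[i] i) := by
      rw [stepG_sorted _ hsd hd, hh]
      exact (drop_skipGroup s s[i] i (le_of_lt hi)).symm
    have hlen : ((s.drop i).length : Int) = (s.length : Int) - (i : Int) := by
      rw [List.length_drop]; omega
    rw [bLoop_append, bLoop_eq_gRes s hs (skipGroup s s[i] i) (skipGroup_le s s[i] i (le_of_lt hi))]
    rw [hstep, hlen]
    simp
  · have hieq : i = s.length := by omega
    simp [hieq, gRes]
termination_by s.length - i
decreasing_by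
  all_goals
    have h1 : i + 1 ≤ skipGroup s s[i] i := by
      unfold skipGroup; simp [hi]; exact le_skipGroup s s[i] (i + 1)
    omega

-- A on a nonempty list, with the match on min reduced
theorem perform_cut_ne (sticks : List Int) (h : sticks ≠ []) :
    perform_cut sticks =
      PySem.List.slice (pcLoop sticks [(sticks.length : Int)]) none (some (-1)) := by
  unfold perform_cut
  rcases hmo : PySem.List.min? sticks (fun x => x) with _ | m
  · exact absurd ((PySem.List.min?_eq_none_iff _ _).mp hmo) h
  · rfl

theorem perform_cut_alt_nil : perform_cut_alt [] = [] := by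
  unfold perform_cut_alt
  rw [bLoop]
  simp

-- ===== VERDICT (by name: the statement is the Claim_ definition above) =====
theorem perform_cut_spec : Claim_equal_perform_cut := by
  intro sticks _ hpre
  unfold Spec_perform_cut perform_cut_alt
  rw [perform_cut_ne sticks hpre, pcLoop_eq_gLoop, PySem.List.slice_to_neg_one,
    List.singleton_append, List.dropLast_cons_of_ne_nil, cons_dropLast_gLoop sticks hpre]
  · have hperm : (PySem.List.sorted sticks (fun x => x) false).Perm sticks :=
      PySem.List.sorted_perm sticks (fun x => x) false
    have hsorted : (PySem.List.sorted sticks (fun x => x) false).Pairwise (· ≤ ·) := by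
      simpa using PySem.List.sorted_pairwise sticks (fun x => x)
    rw [bLoop_eq_gRes _ hsorted 0 (by omega), List.drop_zero]
    exact gRes_perm sticks _ hperm.symm
  · rw [gLoop_ne sticks hpre]; simp

theorem perform_cut_raises : Claim_raises_perform_cut := by
  unfold Claim_raises_perform_cut
  refine ⟨?_, by decide, rfl, perform_cut_alt_nil⟩
  intro sticks _ hr
  unfold Raises_perform_cut at hr
  unfold Pre_perform_cut
  simp [hr]

-- witness self-check: the raise witness is inside Raises_ and B's port returns the stated literal there
theorem pvRaisesWitness_ok :
    Raises_perform_cut pvRaiseWitness_perform_cut ∧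
      perform_cut_alt pvRaiseWitness_perform_cut = pvRaiseWitnessOut_perform_cut :=
  ⟨perform_cut_raises.2.2.1, perform_cut_raises.2.2.2⟩
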